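-- pv_equiv track=rewrite | github.com/pypi-data/pypi-mirror-40 | packages/crossywords/crossywords-0.0.3.tar.gz/crossywords-0.0.3/crossywords/main.py | sortWordsInRelevantWay
-- ===== SOURCE A (Python) =====
-- def bubbleSort(items):
--     for i in range(len(items)):
--         for j in range(len(items) - 1 - i):
--             if len(items[j]) < len(items[j + 1]):
--                 items[j], items[j + 1] = items[j + 1], items[j]
--     return items
--
-- def sortWordsInRelevantWay(words):
--     # sorting dict by length of the comb
--     listOfKeys = [item for item in words]
--     listOfKeys = bubbleSort(listOfKeys)
--     # having a sorted list instead of dict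
--     wordsList = [{item: words[item]} for item in listOfKeys]
--
--     # splitting list in the middle into two parts
--     # and getting a new list sorted in a relevant way
--     sortedWordsList = []
--     num = 1
--     middle = len(wordsList) // 2
--     for index in range(middle - 1):
--         for k, v in wordsList[middle + num - 1].items():
--             sortedWordsList.append({k: v})
--         for k, v in wordsList[middle - num].items():
--             sortedWordsList.append({k: v})
--         num += 1
--     return sortedWordsList
-- ===== SOURCE B (Python) =====
-- def sortWordsInRelevantWay(words):
--     # length-descending stable sort of the keys, then merge the two halves around the middle
--     keys = sorted(words, key=len, reverse=True)
--     middle = len(keys) // 2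
--     return [{k: words[k]} for pair in zip(keys[middle:2 * middle - 1], keys[middle - 1:0:-1]) for k in pair]
-- ===== Notes on version B (the rewrite author's own statement) =====
-- stated objective: faster
-- what changed: A's hand-written O(n^2) bubble sort and its per-index interleaving loop with a running num counter are replaced by the library stable sort (sorted by length, descending) and a zip of two explicit slices around the middle, flattened by a comprehension.
import Mathlib
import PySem

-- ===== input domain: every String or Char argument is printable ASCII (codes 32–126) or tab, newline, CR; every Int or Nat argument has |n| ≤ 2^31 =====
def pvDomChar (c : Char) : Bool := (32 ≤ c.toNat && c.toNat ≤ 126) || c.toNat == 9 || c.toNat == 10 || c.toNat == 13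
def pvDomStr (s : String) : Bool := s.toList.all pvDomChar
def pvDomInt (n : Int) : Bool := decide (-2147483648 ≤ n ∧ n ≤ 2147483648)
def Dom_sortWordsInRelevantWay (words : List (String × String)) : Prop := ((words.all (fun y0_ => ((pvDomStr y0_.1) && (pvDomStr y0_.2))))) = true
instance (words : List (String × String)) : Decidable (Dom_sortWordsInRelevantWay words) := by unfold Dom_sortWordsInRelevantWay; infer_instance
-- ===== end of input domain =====

-- B replaces A's quadratic hand-written bubble sort and per-index interleaving loop by the
-- library stable sort plus a zip of two slices around the middle (objective: faster, O(n log n)).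

-- ===== PORT A =====
def bubbleSort (items : List String) : List String :=
  (PySem.List.pyRange 0 (items.length : Int) 1).foldl (fun its i =>
    (PySem.List.pyRange 0 ((its.length : Int) - 1 - i) 1).foldl (fun its2 j =>
      if PySem.Str.len (PySem.List.pyGetD its2 j "") <
          PySem.Str.len (PySem.List.pyGetD its2 (j + 1) "") then
        let b := PySem.List.pyGetD its2 (j + 1) ""
        let a := PySem.List.pyGetD its2 j ""
        PySem.List.pySetD (PySem.List.pySetD its2 j b) (j + 1) a
      else its2) its) items

def sortWordsInRelevantWay (words : List (String × String)) : List (List (String × String)) :=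
  let listOfKeys := words.map (fun item => item.1)
  let listOfKeys := bubbleSort listOfKeys
  -- words[item] cannot raise (item is always a key of words), so Dict.getD is exact here
  let wordsList := listOfKeys.map (fun item => [(item, PySem.Dict.getD ⟨words⟩ item "")])
  let middle : Int := PySem.Int.floordiv (wordsList.length : Int) 2
  let st := (PySem.List.pyRange 0 (middle - 1) 1).foldl
    (fun (st : List (List (String × String)) × Int) _index =>
      let acc := st.1
      let num := st.2
      let acc := acc ++ (PySem.List.pyGetD wordsList (middle + num - 1) []).map (fun kv => [(kv.1, kv.2)])
      let acc := acc ++ (PySem.List.pyGetD wordsList (middle - num) []).map (fun kv => [(kv.1, kv.2)])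
      (acc, num + 1)) ([], 1)
  st.1

-- ===== PORT B =====
def sortWordsInRelevantWay_alt (words : List (String × String)) : List (List (String × String)) :=
  let keys := PySem.List.sorted (words.map (fun item => item.1)) (fun s => PySem.Str.len s) true
  let middle : Int := PySem.Int.floordiv (keys.length : Int) 2
  let right := PySem.List.slice keys (some middle) (some (2 * middle - 1))
  let left := (PySem.List.slice? keys (some (middle - 1)) (some 0) (-1)).getD []
  (right.zip left).flatMap (fun p =>
    [[(p.1, PySem.Dict.getD ⟨words⟩ p.1 "")], [(p.2, PySem.Dict.getD ⟨words⟩ p.2 "")]])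

-- ===== PRECONDITION & SPEC =====
def Spec_sortWordsInRelevantWay (words : List (String × String)) (out : List (List (String × String))) : Prop := out = sortWordsInRelevantWay_alt words
instance (words : List (String × String)) (out : List (List (String × String))) : Decidable (Spec_sortWordsInRelevantWay words out) := by unfold Spec_sortWordsInRelevantWay; infer_instance

-- ===== CLAIM (what is proved, stated in full; the proofs are below) =====
def Claim_equal_sortWordsInRelevantWay : Prop := ∀ (words : List (String × String)), Dom_sortWordsInRelevantWay words → Spec_sortWordsInRelevantWay words (sortWordsInRelevantWay words)

-- ===== LEMMAS AND PROOFS =====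

-- the key A sorts by (the length of the word)
def pkey (s : String) : Int := PySem.Str.len s

-- the stable descending insertion step of PySem.List.sorted, specialised to pkey
def pins (x : String) (acc : List String) : List String :=
  PySem.List.insertBy (fun a b => decide (pkey b < pkey a)) x acc

-- one bubble pass over the first k+1 elements, written structurally
def bpass : List String → Nat → List String
  | l, 0 => l
  | [], _ + 1 => []
  | [a], _ + 1 => [a]
  | a :: b :: t, k + 1 =>
      if pkey a < pkey b then b :: bpass (a :: t) k else a :: bpass (b :: t) k

theorem bpass_length (l : List String) (k : Nat) : (bpass l k).length = l.length := by
  induction k generalizing l with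
  | zero => simp [bpass]
  | succ k ih =>
    match l with
    | [] => simp [bpass]
    | [a] => simp [bpass]
    | a :: b :: t =>
      simp only [bpass]
      split <;> simp [ih]

theorem bpass_perm (l : List String) (k : Nat) : (bpass l k).Perm l := by
  induction k generalizing l with
  | zero => simp [bpass]
  | succ k ih =>
    match l with
    | [] => simp [bpass]
    | [a] => simp [bpass]
    | a :: b :: t =>
      simp only [bpass]
      split
      · exact ((ih (a :: t)).cons b).trans (List.Perm.swap a b t)
      · exact (ih (b :: t)).cons a

theorem bpass_append (k : Nat) (u v : List String) (h : k + 1 ≤ u.length) :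
    bpass (u ++ v) k = bpass u k ++ v := by
  induction k generalizing u with
  | zero => simp [bpass]
  | succ k ih =>
    match u with
    | [] => simp at h
    | [a] => simp at h
    | a :: b :: t =>
      simp only [List.cons_append, bpass]
      have h' : k + 1 ≤ t.length + 1 := by simp at h; omega
      split
      · rw [← List.cons_append, ih (a :: t) (by simpa using h')]; simp
      · rw [← List.cons_append, ih (b :: t) (by simpa using h')]; simp

theorem pins_nil (x : String) : pins x [] = [x] := by
  simp [pins, PySem.List.insertBy]

theorem pins_cons (x y : String) (t : List String) :
    pins x (y :: t) = if pkey y < pkey x then x :: y :: t else y :: pins x t := by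
  simp [pins, PySem.List.insertBy]

theorem pins_comm (a b : String) (hab : pkey a < pkey b) (ys : List String) :
    pins b (pins a ys) = pins a (pins b ys) := by
  induction ys with
  | nil =>
    rw [pins_nil, pins_nil, pins_cons, pins_cons, if_pos hab, if_neg (by omega), pins_nil]
  | cons y t ih =>
    rw [pins_cons (x := a), pins_cons (x := b) (y := y)]
    split_ifs with h1 h2 h3
    · rw [pins_cons, if_pos hab, pins_cons, if_neg (by omega), pins_cons, if_pos h1]
    · omega
    · rw [pins_cons, if_pos h3, pins_cons, if_neg (by omega), pins_cons, if_neg h1]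
    · rw [pins_cons, if_neg h3, pins_cons, if_neg h1, ih]

theorem foldl_pins_pass (k : Nat) : ∀ (l acc : List String),
    (bpass l k).foldl (fun acc x => pins x acc) acc = l.foldl (fun acc x => pins x acc) acc := by
  induction k with
  | zero => intro l acc; rfl
  | succ k ih =>
    intro l acc
    match l with
    | [] => rfl
    | [a] => rfl
    | a :: b :: t =>
      simp only [bpass]
      split
      · rename_i h
        simp only [List.foldl_cons]
        rw [ih (a :: t) (pins b acc)]
        simp only [List.foldl_cons]
        rw [pins_comm a b h acc]
      · simp only [List.foldl_cons]
        rw [ih (b :: t) (pins a acc)]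
        simp only [List.foldl_cons]

theorem sorted_pass (l : List String) (k : Nat) :
    PySem.List.sorted (bpass l k) pkey true = PySem.List.sorted l pkey true := by
  rw [PySem.List.sorted_rev_eq_foldl_insertBy, PySem.List.sorted_rev_eq_foldl_insertBy]
  exact foldl_pins_pass k l []

theorem sorted_snoc_min (u : List String) (z : String) (h : ∀ y ∈ u, pkey z ≤ pkey y) :
    PySem.List.sorted (u ++ [z]) pkey true = PySem.List.sorted u pkey true ++ [z] := by
  rw [PySem.List.sorted_rev_eq_foldl_insertBy, PySem.List.sorted_rev_eq_foldl_insertBy]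
  rw [List.foldl_append]
  simp only [List.foldl_cons, List.foldl_nil]
  have : ∀ y ∈ (PySem.List.sorted u pkey true), (fun a b => decide (pkey b < pkey a)) z y = false := by
    intro y hy
    have : y ∈ u := (PySem.List.mem_sorted u pkey true y).1 hy
    simp only [decide_eq_false_iff_not, not_lt]
    exact h y this
  rw [← PySem.List.sorted_rev_eq_foldl_insertBy]
  exact PySem.List.insertBy_of_forall_not_before _ z _ this

theorem bpass_min : ∀ (n : Nat) (l : List String), l.length = n → l ≠ [] →
    ∃ u z, bpass l (l.length - 1) = u ++ [z] ∧ ∀ x ∈ l, pkey z ≤ pkey x := by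
  intro n
  induction n with
  | zero => intro l hl hne; simp [List.length_eq_zero_iff] at hl; exact absurd hl hne
  | succ m ih =>
    intro l hl hne
    match l with
    | [a] =>
      exact ⟨[], a, by simp [bpass], by simp⟩
    | a :: b :: t =>
      simp only [List.length_cons] at hl ⊢
      have hlt : (t.length + 1 + 1) - 1 = t.length + 1 := by omega
      rw [hlt]
      show ∃ u z, (if pkey a < pkey b then b :: bpass (a :: t) t.length
        else a :: bpass (b :: t) t.length) = u ++ [z] ∧ _
      split
      · rename_i hab
        obtain ⟨u', z', hu', hmin'⟩ := ih (a :: t) (by simp; omega) (by simp)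
        simp only [List.length_cons, Nat.add_sub_cancel] at hu'
        refine ⟨b :: u', z', by rw [hu']; rfl, ?_⟩
        intro x hx
        rcases hx with _ | hx
        · exact hmin' a (by simp)
        · rename_i hx'
          rcases hx' with _ | hx''
          · have := hmin' a (by simp); omega
          · exact hmin' x (by simp; right; assumption)
      · rename_i hab
        obtain ⟨u', z', hu', hmin'⟩ := ih (b :: t) (by simp; omega) (by simp)
        simp only [List.length_cons, Nat.add_sub_cancel] at hu'
        refine ⟨a :: u', z', by rw [hu']; rfl, ?_⟩
        intro x hx
        rcases hx with _ | hx
        · have := hmin' b (by simp); omega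
        · rename_i hx'
          rcases hx' with _ | hx''
          · exact hmin' b (by simp)
          · exact hmin' x (by simp; right; assumption)

theorem foldl_pass_append (f : Nat → Nat) (z : String) :
    ∀ (L : List Nat) (u : List String), (∀ i ∈ L, f i + 1 ≤ u.length) →
    L.foldl (fun its i => bpass its (f i)) (u ++ [z]) =
      L.foldl (fun its i => bpass its (f i)) u ++ [z] := by
  intro L
  induction L with
  | nil => intro u h; rfl
  | cons a L ih =>
    intro u h
    simp only [List.foldl_cons]
    rw [bpass_append (f a) u [z] (h a (by simp))]
    exact ih (bpass u (f a)) (fun i hi => by rw [bpass_length]; exact h i (by simp [hi]))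

theorem bub_spec : ∀ (n : Nat) (l : List String), l.length = n →
    (List.range n).foldl (fun its i => bpass its (n - 1 - i)) l = PySem.List.sorted l pkey true := by
  intro n
  induction n with
  | zero =>
    intro l hl
    simp [List.length_eq_zero_iff] at hl
    subst hl
    simp [(PySem.List.sorted_eq_nil_iff ([] : List String) pkey true).2 rfl]
  | succ m ih =>
    intro l hl
    have hne : l ≠ [] := by intro h; subst h; simp at hl
    rw [List.range_succ_eq_map]
    simp only [List.foldl_cons]
    have hw0 : m + 1 - 1 - 0 = m := by omega
    rw [hw0]
    have hlm : l.length - 1 = m := by omega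
    obtain ⟨u, z, hu, hmin⟩ := bpass_min l.length l rfl hne
    rw [hlm] at hu
    have hulen : u.length = m := by
      have := bpass_length l m
      rw [hu] at this
      simp at this; omega
    rw [List.foldl_map, hu]
    have hcong : ∀ (its : List String) (i : Nat),
        bpass its (m + 1 - 1 - (i + 1)) = bpass its (m - 1 - i) := by
      intro its i; congr 1; omega
    calc (List.range m).foldl (fun its i => bpass its (m + 1 - 1 - (i + 1))) (u ++ [z])
        = (List.range m).foldl (fun its i => bpass its (m - 1 - i)) (u ++ [z]) := by
          have hfe : (fun (its : List String) (i : Nat) => bpass its (m + 1 - 1 - (i + 1)))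
              = (fun its i => bpass its (m - 1 - i)) :=
            funext fun its => funext fun i => hcong its i
          rw [hfe]
      _ = (List.range m).foldl (fun its i => bpass its (m - 1 - i)) u ++ [z] := by
          apply foldl_pass_append
          intro i hi
          rw [hulen]
          have : i < m := List.mem_range.1 hi
          omega
      _ = PySem.List.sorted u pkey true ++ [z] := by rw [ih u hulen]
      _ = PySem.List.sorted (u ++ [z]) pkey true := by
          rw [sorted_snoc_min u z]
          intro y hy
          have hyl : y ∈ l := (bpass_perm l m).subset (by rw [hu]; simp [hy])
          exact hmin y hyl
      _ = PySem.List.sorted (bpass l m) pkey true := by rw [hu]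
      _ = PySem.List.sorted l pkey true := sorted_pass l m

-- the body of A's inner bubble loop

def swapBody (its2 : List String) (j : Int) : List String :=
  if PySem.Str.len (PySem.List.pyGetD its2 j "") <
      PySem.Str.len (PySem.List.pyGetD its2 (j + 1) "") then
    let b := PySem.List.pyGetD its2 (j + 1) ""
    let a := PySem.List.pyGetD its2 j ""
    PySem.List.pySetD (PySem.List.pySetD its2 j b) (j + 1) a
  else its2

theorem set_append_len {α : Type} (u : List α) (x v : α) (r : List α) :
    (u ++ x :: r).set u.length v = u ++ v :: r := by
  induction u with
  | nil => rfl
  | cons a u ih => simp [ih]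

theorem getD_append_len {α : Type} (u : List α) (x : α) (r : List α) (d : α) :
    (u ++ x :: r).getD u.length d = x := by
  simp [List.getD_eq_getElem?_getD]

theorem inner_spec (k : Nat) : ∀ (u rest : List String), k + 1 ≤ rest.length →
    (List.range' u.length k).foldl (fun (its2 : List String) (jN : Nat) => swapBody its2 (jN : Int)) (u ++ rest) =
      u ++ bpass rest k := by
  induction k with
  | zero => intro u rest h; simp [bpass]
  | succ k ih =>
    intro u rest h
    match rest with
    | [] => simp at h
    | [a] => simp at h
    | a :: b :: t =>
      have hj : PySem.List.pyGetD (u ++ a :: b :: t) (u.length : Int) "" = a := by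
        rw [PySem.List.pyGetD_natCast, getD_append_len]
      have hj1 : PySem.List.pyGetD (u ++ a :: b :: t) ((u.length : Int) + 1) "" = b := by
        rw [show ((u.length : Int) + 1) = ((u.length + 1 : Nat) : Int) by push_cast; ring,
          PySem.List.pyGetD_natCast,
          show u.length + 1 = (u ++ [a]).length by simp,
          show u ++ a :: b :: t = (u ++ [a]) ++ b :: t by simp]
        exact getD_append_len (u ++ [a]) b t ""
      have hstep : swapBody (u ++ a :: b :: t) (u.length : Int) =
          u ++ (if pkey a < pkey b then b :: a :: t else a :: b :: t) := by
        unfold swapBody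
        rw [hj, hj1]
        by_cases hab : pkey a < pkey b
        · rw [if_pos hab, if_pos (show PySem.Str.len a < PySem.Str.len b from hab)]
          show PySem.List.pySetD (PySem.List.pySetD (u ++ a :: b :: t) (u.length : Int) b)
              ((u.length : Int) + 1) a = u ++ b :: a :: t
          rw [PySem.List.pySetD_natCast, set_append_len,
            show ((u.length : Int) + 1) = ((u.length + 1 : Nat) : Int) by push_cast; ring,
            PySem.List.pySetD_natCast,
            show u.length + 1 = (u ++ [b]).length by simp,
            show u ++ b :: b :: t = (u ++ [b]) ++ b :: t by simp,
            set_append_len]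
          simp
        · rw [if_neg hab, if_neg (show ¬ PySem.Str.len a < PySem.Str.len b from hab)]
      rw [List.range'_succ, List.foldl_cons, hstep]
      simp only [List.length_cons] at h
      by_cases hab : pkey a < pkey b
      · rw [if_pos hab]
        rw [show u ++ b :: a :: t = (u ++ [b]) ++ a :: t by simp,
          show (List.range' (u.length + 1) k) = (List.range' ((u ++ [b]).length) k) by simp,
          ih (u ++ [b]) (a :: t) (by simp; omega)]
        simp only [bpass]
        rw [if_pos hab]
        simp
      · rw [if_neg hab]
        rw [show u ++ a :: b :: t = (u ++ [a]) ++ b :: t by simp,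
          show (List.range' (u.length + 1) k) = (List.range' ((u ++ [a]).length) k) by simp,
          ih (u ++ [a]) (b :: t) (by simp; omega)]
        simp only [bpass]
        rw [if_neg hab]
        simp

theorem bubble_eq (l : List String) : bubbleSort l = PySem.List.sorted l pkey true := by
  unfold bubbleSort
  rw [PySem.List.pyRange_zero_natCast, List.foldl_map, ← bub_spec l.length l rfl]
  have main : ∀ (L : List Nat) (its : List String), (∀ i ∈ L, i < l.length) →
      its.length = l.length →
      L.foldl (fun (its : List String) (i : Nat) =>
        (PySem.List.pyRange 0 ((its.length : Int) - 1 - ((i : Nat) : Int)) 1).foldl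
          (fun (its2 : List String) (j : Int) => swapBody its2 j) its) its =
      L.foldl (fun (its : List String) (i : Nat) => bpass its (l.length - 1 - i)) its := by
    intro L
    induction L with
    | nil => intro its _ _; rfl
    | cons i L ih =>
      intro its hmem hlen
      simp only [List.foldl_cons]
      have hi : i < l.length := hmem i (by simp)
      have hM : ((its.length : Int) - 1 - ((i : Nat) : Int)) = ((l.length - 1 - i : Nat) : Int) := by
        rw [hlen]; omega
      have hinner : (PySem.List.pyRange 0 ((its.length : Int) - 1 - ((i : Nat) : Int)) 1).foldl
          (fun (its2 : List String) (j : Int) => swapBody its2 j) its =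
          bpass its (l.length - 1 - i) := by
        rw [hM, PySem.List.pyRange_zero_natCast, List.foldl_map, List.range_eq_range']
        exact inner_spec (l.length - 1 - i) [] its (by rw [hlen]; omega)
      rw [hinner]
      exact ih (bpass its (l.length - 1 - i)) (fun j hj => hmem j (by simp [hj]))
        (by rw [bpass_length, hlen])
  exact main (List.range l.length) l (fun i hi => List.mem_range.1 hi) rfl

theorem filterMap_eq_map_of_some {α β : Type} (L : List α) (f : α → Option β) (g : α → β)
    (h : ∀ x ∈ L, f x = some (g x)) : L.filterMap f = L.map g := by
  induction L with
  | nil => rfl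
  | cons a L ih =>
    rw [List.filterMap_cons, h a (by simp), List.map_cons, ih (fun x hx => h x (by simp [hx]))]

theorem slice?_down {α : Type} [Inhabited α] (xs : List α) (p : Nat) (hp : p < xs.length) :
    PySem.List.slice? xs (some (p : Int)) (some 0) (-1) =
      some ((List.range p).map (fun k => xs.getD (p - k) default)) := by
  unfold PySem.List.slice? PySem.List.sliceIndices
  norm_num
  have hs : (if (p : Int) < 0 then max ((p : Int) + (xs.length : Int)) (-1)
      else min (p : Int) ((xs.length : Int) - 1)) = (p : Int) := by
    rw [if_neg (by omega)]; omega
  rw [hs]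
  have hcount : (if ((0:Int) < (p:Int) ∨ ((xs.length:Int)) ≤ (p:Int)) then ((p:Int) - min 0 ((xs.length:Int) - 1)).toNat else 0) = p := by
    split_ifs <;> omega
  rw [hcount]
  apply filterMap_eq_map_of_some
  intro x hx
  have hxp : x < p := List.mem_range.1 hx
  have h1 : ((p : Int) + -(x : Int)).toNat = p - x := by omega
  rw [h1, List.getElem?_eq_getElem (by omega)]
  rfl

-- A's interleaving loop, abstracted

def σp (kv : String × String) : List (String × String) := [(kv.1, kv.2)]

def stepA (wl : List (List (String × String))) (mI : Int)
    (st : List (List (String × String)) × Int) : List (List (String × String)) × Int :=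
  (st.1 ++ ((PySem.List.pyGetD wl (mI + st.2 - 1) []).map σp)
        ++ ((PySem.List.pyGetD wl (mI - st.2) []).map σp), st.2 + 1)

def bodyA (wl : List (List (String × String))) (mI : Int) (idx : Nat) : List (List (String × String)) :=
  ((PySem.List.pyGetD wl (mI + ((idx : Int) + 1) - 1) []).map σp)
    ++ ((PySem.List.pyGetD wl (mI - ((idx : Int) + 1)) []).map σp)

theorem loopA (wl : List (List (String × String))) (mI : Int) :
    ∀ (k s : Nat) (acc : List (List (String × String))),
    (List.range' s k).foldl (fun st (_ : Nat) => stepA wl mI st) (acc, (s : Int) + 1) =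
      (acc ++ (List.range' s k).flatMap (bodyA wl mI), ((s + k : Nat) : Int) + 1) := by
  intro k
  induction k with
  | zero => intro s acc; simp
  | succ k ih =>
    intro s acc
    rw [List.range'_succ, List.foldl_cons, List.flatMap_cons]
    have hstep : stepA wl mI (acc, (s : Int) + 1) =
        (acc ++ bodyA wl mI s, ((s + 1 : Nat) : Int) + 1) := by
      unfold stepA bodyA
      rw [Prod.mk.injEq]
      exact ⟨by simp [List.append_assoc], by push_cast; ring⟩
    rw [hstep, ih (s + 1)]
    rw [Prod.mk.injEq]
    exact ⟨by simp [List.append_assoc], by push_cast; ring⟩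

-- proof-only abbreviations for the two ports after their sort has been computed
def pentry (words : List (String × String)) (k : String) : List (String × String) :=
  [(k, PySem.Dict.getD ⟨words⟩ k "")]

def interA (words : List (String × String)) (ks : List String) : List (List (String × String)) :=
  ((PySem.List.pyRange 0 (PySem.Int.floordiv (((ks.map (pentry words)).length : Int)) 2 - 1) 1).foldl
    (fun (st : List (List (String × String)) × Int) (_ : Int) =>
      stepA (ks.map (pentry words)) (PySem.Int.floordiv (((ks.map (pentry words)).length : Int)) 2) st)
    ([], 1)).1

def interB (words : List (String × String)) (ks : List String) : List (List (String × String)) :=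
  ((PySem.List.slice ks (some (PySem.Int.floordiv ((ks.length : Int)) 2))
      (some (2 * PySem.Int.floordiv ((ks.length : Int)) 2 - 1))).zip
    ((PySem.List.slice? ks (some (PySem.Int.floordiv ((ks.length : Int)) 2 - 1)) (some 0) (-1)).getD [])).flatMap
    (fun p => [[(p.1, PySem.Dict.getD ⟨words⟩ p.1 "")], [(p.2, PySem.Dict.getD ⟨words⟩ p.2 "")]])

theorem portA_inter (words : List (String × String)) :
    sortWordsInRelevantWay words = interA words (bubbleSort (words.map (fun item => item.1))) := rfl

theorem portB_inter (words : List (String × String)) :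
    sortWordsInRelevantWay_alt words =
      interB words (PySem.List.sorted (words.map (fun item => item.1)) (fun s => PySem.Str.len s) true) := rfl

theorem floordiv_two (n : Nat) : PySem.Int.floordiv (n : Int) 2 = ((n / 2 : Nat) : Int) := by
  simp [PySem.Int.floordiv, Int.fdiv_eq_ediv]

theorem getD_map_of_lt {α β : Type} (f : α → β) (xs : List α) (i : Nat) (h : i < xs.length)
    (d : β) (d' : α) : (xs.map f).getD i d = f (xs.getD i d') := by
  rw [List.getD_eq_getElem?_getD, List.getElem?_map, List.getElem?_eq_getElem h,
    List.getD_eq_getElem?_getD, List.getElem?_eq_getElem h]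
  rfl

theorem take_drop_eq_map_getD {α : Type} [Inhabited α] (xs : List α) (a b : Nat)
    (h : a + b ≤ xs.length) :
    (xs.drop a).take b = (List.range b).map (fun i => xs.getD (a + i) default) := by
  apply List.ext_getElem
  · simp; omega
  · intro i h1 h2
    simp only [List.getElem_take, List.getElem_drop, List.getElem_map, List.getElem_range]
    rw [List.getD_eq_getElem?_getD, List.getElem?_eq_getElem (by simp at h1 ⊢; omega)]
    rfl

theorem main_inter (words : List (String × String)) (ks : List String) :
    interA words ks = interB words ks := by
  unfold interA interB
  have hlen : (ks.map (pentry words)).length = ks.length := by simp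
  rw [hlen, floordiv_two ks.length]
  set n := ks.length with hn
  set m := n / 2 with hm
  have hn2m : 2 * m ≤ n := by omega
  by_cases hm0 : m = 0
  · -- n ≤ 1 : both sides are []
    rw [hm0]
    have hc : ((0:Nat):Int) - 1 = -1 := by norm_num
    rw [hc]
    have hpr : PySem.List.pyRange 0 (-1) 1 = [] := by decide
    rw [hpr]
    have hn1 : n ≤ 1 := by omega
    have hright : PySem.List.slice ks (some ((0:Nat):Int)) (some (2 * ((0:Nat):Int) - 1)) = ks.dropLast := by
      norm_num
      rw [PySem.List.slice_to_neg_one]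
    rw [hright]
    have hdl : ks.dropLast = [] := by
      cases ks with
      | nil => rfl
      | cons a t =>
        cases t with
        | nil => rfl
        | cons b u => exfalso; rw [hn] at hn1; simp at hn1
    rw [hdl]
    simp
  · -- m ≥ 1
    have hm1 : 1 ≤ m := by omega
    have hmn : m - 1 < n := by omega
    -- A side
    have hcA : ((m:Nat):Int) - 1 = (((m - 1 : Nat)):Int) := by omega
    rw [hcA, PySem.List.pyRange_zero_natCast, List.foldl_map]
    have hla := loopA (List.map (pentry words) ks) ((m:Nat):Int) (m - 1) 0 []
    rw [List.range_eq_range']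
    norm_num at hla
    rw [hla]
    simp only []
    -- B side
    have hc2 : 2 * ((m:Nat):Int) - 1 = (((2 * m - 1 : Nat)):Int) := by omega
    rw [hc2, PySem.List.slice_natCast]
    have hc3 : 2 * m - 1 - m = m - 1 := by omega
    rw [hc3, take_drop_eq_map_getD ks m (m - 1) (by omega)]
    rw [slice?_down ks (m - 1) hmn]
    rw [Option.getD_some, List.zip_map', List.flatMap_map]
    rw [List.flatMap_def, List.flatMap_def, ← List.range_eq_range']
    congr 1
    apply List.map_congr_left
    intro i hi
    have hilt : i < m - 1 := List.mem_range.1 hi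
    unfold bodyA
    have e1 : ((m:Nat):Int) + (((i:Nat):Int) + 1) - 1 = (((m + i : Nat)):Int) := by push_cast; ring
    have e2 : ((m:Nat):Int) - (((i:Nat):Int) + 1) = (((m - 1 - i : Nat)):Int) := by omega
    rw [e1, e2, PySem.List.pyGetD_natCast, PySem.List.pyGetD_natCast]
    rw [getD_map_of_lt (pentry words) ks (m + i) (by omega) [] default,
      getD_map_of_lt (pentry words) ks (m - 1 - i) (by omega) [] default]
    simp [pentry, σp]

theorem final_eq (words : List (String × String)) :
    sortWordsInRelevantWay words = sortWordsInRelevantWay_alt words := by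
  rw [portA_inter, portB_inter, bubble_eq]
  exact main_inter words _

-- ===== VERDICT (by name: the statement is the Claim_ definition above) =====
theorem sortWordsInRelevantWay_spec : Claim_equal_sortWordsInRelevantWay := by
  intro words _
  show sortWordsInRelevantWay words = sortWordsInRelevantWay_alt words
  exact final_eq words
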